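-- pv_equiv track=rewrite | github.com/Jerempire/gym-anything | benchmarks/cua_world/environments/graphite_env/tasks/network_route_divergence_monitoring/verifier.py | _any_target_contains_all
-- ===== SOURCE A (Python) =====
-- def _any_target_contains_all(targets, substrings_sets):
--     """Check if ALL substring requirements are met across ANY targets."""
--     for required_subs in substrings_sets:
--         found = False
--         for t in targets:
--             tl = t.lower()
--             if all(sub.lower() in tl for sub in required_subs):
--                 found = True
--                 break
--         if not found:
--             return False
--     return True
-- ===== SOURCE B (Python) =====
-- def _any_target_contains_all(targets, substrings_sets):
--     # Worklist sweep: lowercase every requirement once, then make a single pass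
--     # over the distinct lowercased targets, keeping only the still-unmet
--     # requirements; done as soon as the worklist empties.
--     pending = [[sub.lower() for sub in req] for req in substrings_sets]
--     for tl in dict.fromkeys(t.lower() for t in targets):
--         if not pending:
--             break
--         still = []
--         for req in pending:
--             for sub in req:
--                 if sub not in tl:
--                     still.append(req)
--                     break
--         pending = still
--     return not pending
-- ===== Notes on version B (the rewrite author's own statement) =====
-- stated objective: alternative
-- what changed: B inverts the loop nesting: it lowercases each requirement once, deduplicates the lowercased targets, and makes a single sweep over them maintaining a worklist of still-unmet requirement sets (breaking out when it empties), returning whether the worklist is empty, instead of A's per-requirement rescan of all targets with repeated lowercasing.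
import Mathlib
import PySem

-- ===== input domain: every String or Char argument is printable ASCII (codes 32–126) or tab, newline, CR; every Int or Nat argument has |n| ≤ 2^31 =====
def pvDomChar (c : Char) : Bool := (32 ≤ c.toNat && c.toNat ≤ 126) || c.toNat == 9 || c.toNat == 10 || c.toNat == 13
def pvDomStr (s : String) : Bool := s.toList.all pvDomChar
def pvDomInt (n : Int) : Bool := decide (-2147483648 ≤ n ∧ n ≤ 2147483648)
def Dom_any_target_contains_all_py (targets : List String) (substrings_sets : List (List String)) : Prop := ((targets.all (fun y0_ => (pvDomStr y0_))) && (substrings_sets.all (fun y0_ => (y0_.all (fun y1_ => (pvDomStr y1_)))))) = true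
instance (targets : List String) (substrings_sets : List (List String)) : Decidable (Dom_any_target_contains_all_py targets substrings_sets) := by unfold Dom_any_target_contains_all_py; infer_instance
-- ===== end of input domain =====

-- B inverts A's loop nesting: it lowercases every requirement once, then makes a single
-- sweep over the DISTINCT lowercased targets maintaining the worklist of still-unmet
-- requirements, stopping early when it empties (objective: alternative decomposition).

-- ===== PORT A =====
-- A's inner 'for t in targets: … found = True; break' loop, returning found
def pvFindTarget (targets : List String) (required_subs : List String) : Bool :=
  match targets with
  | [] => false
  | t :: rest =>
    let tl := PySem.Str.lower t
    if required_subs.all (fun sub => PySem.Str.isIn (PySem.Str.lower sub) tl) then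
      true
    else
      pvFindTarget rest required_subs

def any_target_contains_all_py (targets : List String) (substrings_sets : List (List String)) : Bool :=
  match substrings_sets with
  | [] => true
  | required_subs :: rest =>
    if pvFindTarget targets required_subs then
      any_target_contains_all_py targets rest
    else
      false

-- ===== PORT B =====
-- the inner 'for sub in req: if sub not in tl: …; break' loop: some sub is missing from tl
def pvMissing (tl : String) (req : List String) : Bool :=
  match req with
  | [] => false
  | sub :: rest => if !(PySem.Str.isIn sub tl) then true else pvMissing tl rest

-- the 'for tl in …: if not pending: break; …' sweep over the distinct lowered targets
def pvSweep (lowered : List String) (pending : List (List String)) : List (List String) :=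
  match lowered with
  | [] => pending
  | tl :: rest =>
    if pending.isEmpty then pending
    else pvSweep rest (pending.filter (fun req => pvMissing tl req))

def any_target_contains_all_py_alt (targets : List String) (substrings_sets : List (List String)) : Bool :=
  let pending := substrings_sets.map (fun req => req.map PySem.Str.lower)
  (pvSweep (PySem.List.dedup (targets.map (fun t => PySem.Str.lower t))) pending).isEmpty

-- ===== PRECONDITION & SPEC =====
def Spec_any_target_contains_all_py (targets : List String) (substrings_sets : List (List String)) (out : Bool) : Prop := out = any_target_contains_all_py_alt targets substrings_sets
instance (targets : List String) (substrings_sets : List (List String)) (out : Bool) : Decidable (Spec_any_target_contains_all_py targets substrings_sets out) := by unfold Spec_any_target_contains_all_py; infer_instance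

-- ===== CLAIM (what is proved, stated in full; the proofs are below) =====
def Claim_equal_any_target_contains_all_py : Prop := ∀ (targets : List String) (substrings_sets : List (List String)), Dom_any_target_contains_all_py targets substrings_sets → Spec_any_target_contains_all_py targets substrings_sets (any_target_contains_all_py targets substrings_sets)

-- ===== LEMMAS AND PROOFS =====

-- 'all(sub.lower() in tl for sub in req)' as seen by A (req not yet lowered)
def pvChk (tl : String) (req : List String) : Bool :=
  req.all (fun sub => PySem.Str.isIn (PySem.Str.lower sub) tl)

lemma pvFindTarget_eq_any (ts req : List String) :
    pvFindTarget ts req = ts.any (fun t => pvChk (PySem.Str.lower t) req) := by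
  induction ts with
  | nil => rfl
  | cons t rest ih =>
    show (if pvChk (PySem.Str.lower t) req then true else pvFindTarget rest req) = _
    rw [List.any_cons, ih]
    cases h : pvChk (PySem.Str.lower t) req
    · simp
    · simp

lemma pvA_eq_all (ts : List String) (ss : List (List String)) :
    any_target_contains_all_py ts ss = ss.all (fun req => pvFindTarget ts req) := by
  induction ss with
  | nil => rfl
  | cons req rest ih =>
    simp only [any_target_contains_all_py, List.all_cons]
    split <;> simp_all

lemma pvMissing_eq_not_all (tl : String) (req : List String) :
    pvMissing tl req = !(req.all (fun sub => PySem.Str.isIn sub tl)) := by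
  induction req with
  | nil => rfl
  | cons sub rest ih =>
    simp only [pvMissing, List.all_cons, ih]
    cases h : PySem.Str.isIn sub tl <;> simp

lemma pvSweep_eq_filter (tls : List String) (pending : List (List String)) :
    pvSweep tls pending =
      pending.filter (fun req => !(tls.any (fun tl => req.all (fun sub => PySem.Str.isIn sub tl)))) := by
  induction tls generalizing pending with
  | nil => simp [pvSweep]
  | cons tl rest ih =>
    simp only [pvSweep]
    split
    · rename_i h
      rw [List.isEmpty_iff] at h
      simp [h]
    · rw [ih, List.filter_filter]
      apply List.filter_congr
      intro req _
      rw [pvMissing_eq_not_all, List.any_cons]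
      cases h1 : req.all (fun sub => PySem.Str.isIn sub tl) <;> simp

-- ===== VERDICT (by name: the statement is the Claim_ definition above) =====
theorem any_target_contains_all_py_spec : Claim_equal_any_target_contains_all_py := by
  intro ts ss _
  unfold Spec_any_target_contains_all_py any_target_contains_all_py_alt
  show _ = (pvSweep (PySem.List.dedup (ts.map (fun t => PySem.Str.lower t))) (ss.map (fun req => req.map PySem.Str.lower))).isEmpty
  rw [pvA_eq_all, pvSweep_eq_filter, Bool.eq_iff_iff]
  simp only [List.all_eq_true, List.isEmpty_iff, List.filter_eq_nil_iff, List.mem_map,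
    Bool.not_eq_true', Bool.not_eq_false, forall_exists_index, and_imp,
    forall_apply_eq_imp_iff₂]
  constructor
  · intro h req hreq
    have := h req hreq
    rw [pvFindTarget_eq_any, List.any_eq_true] at this
    rw [List.any_eq_true]
    obtain ⟨t, ht, hchk⟩ := this
    refine ⟨PySem.Str.lower t, ?_, ?_⟩
    · rw [PySem.List.mem_dedup]
      exact List.mem_map.2 ⟨t, ht, rfl⟩
    · rw [List.all_map]
      simpa [pvChk, Function.comp] using hchk
  · intro h req hreq
    have := h req hreq
    rw [List.any_eq_true] at this
    rw [pvFindTarget_eq_any, List.any_eq_true]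
    obtain ⟨tl, htl, hall⟩ := this
    rw [PySem.List.mem_dedup] at htl
    obtain ⟨t, ht, rfl⟩ := List.mem_map.1 htl
    refine ⟨t, ht, ?_⟩
    rw [List.all_map] at hall
    simpa [pvChk, Function.comp] using hall
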